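-- pv_equiv track=rewrite | github.com/bbaranoff/dst80_reversing | generate.py | construct_kr
-- ===== SOURCE A (Python) =====
-- def construct_kr(kl):
--     """Calcule KR à partir de KL via le masque de symétrie constructeur"""
--     bytes_kl = [(kl >> (i * 8)) & 0xFF for i in range(5)]
--     # Logique : [~B0][~B1][~B2][~B3][~B4]
--     kr = ((255 - bytes_kl[0]) << 32) | \
--          ((255 - bytes_kl[1]) << 24) | \
--          ((255 - bytes_kl[2]) << 16) | \
--          ((255 - bytes_kl[3]) << 8)  | \
--          (255 - bytes_kl[4])
--     return kr
-- ===== SOURCE B (Python) =====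
-- def construct_kr(kl):
--     """KR = byte-reversed bitwise complement of KL's low 40 bits, done as word-level ops."""
--     rev = int.from_bytes((kl % (1 << 40)).to_bytes(5, 'big')[::-1], 'big')
--     return 0xFFFFFFFFFF - rev
-- ===== Notes on version B (the rewrite author's own statement) =====
-- stated objective: simpler
-- what changed: Replaces the per-byte extract/complement/shift/OR reassembly with one word-level computation: mask to 40 bits, byte-swap via to_bytes/from_bytes, and a single subtraction from 0xFFFFFFFFFF for the complement.
import Mathlib
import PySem

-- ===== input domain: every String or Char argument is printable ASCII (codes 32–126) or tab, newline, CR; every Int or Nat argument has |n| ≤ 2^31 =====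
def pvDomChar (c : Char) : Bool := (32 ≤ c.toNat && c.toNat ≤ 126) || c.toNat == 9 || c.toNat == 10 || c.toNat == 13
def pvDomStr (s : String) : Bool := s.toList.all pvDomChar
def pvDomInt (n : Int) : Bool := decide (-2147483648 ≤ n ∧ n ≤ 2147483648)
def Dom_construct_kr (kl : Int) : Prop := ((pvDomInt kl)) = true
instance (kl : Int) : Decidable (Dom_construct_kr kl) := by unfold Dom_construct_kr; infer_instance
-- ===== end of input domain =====

-- ===== PORT A =====
-- A: extracts the five bytes of kl with shift/mask, complements each, and reassembles with shifts and ORs.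
def construct_kr (kl : Int) : Int :=
  let bytes_kl := (PySem.List.pyRange 0 5 1).map (fun i => PySem.Int.band (kl >>> (i * 8).toNat) 255)
  PySem.Int.bor (PySem.Int.bor (PySem.Int.bor (PySem.Int.bor
    ((255 - PySem.List.pyGetD bytes_kl 0 0) <<< (32:Nat))
    ((255 - PySem.List.pyGetD bytes_kl 1 0) <<< (24:Nat)))
    ((255 - PySem.List.pyGetD bytes_kl 2 0) <<< (16:Nat)))
    ((255 - PySem.List.pyGetD bytes_kl 3 0) <<< (8:Nat)))
    (255 - PySem.List.pyGetD bytes_kl 4 0)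

-- ===== PORT B =====
-- B: one word-level computation — mask kl to 40 bits, byte-swap (to_bytes big / reversed / from_bytes big),
-- subtract from 0xFFFFFFFFFF.  to_bytes(5,'big') and int.from_bytes are ported by hand as the base-256 digit
-- list and the foldl Horner sum (exact for the 0 ≤ m < 2^40 values they are applied to).
def construct_kr_alt (kl : Int) : Int :=
  let m := PySem.Int.mod kl 1099511627776
  let bytesBig : List Int :=
    [PySem.Int.floordiv m 4294967296,
     PySem.Int.mod (PySem.Int.floordiv m 16777216) 256,
     PySem.Int.mod (PySem.Int.floordiv m 65536) 256,
     PySem.Int.mod (PySem.Int.floordiv m 256) 256,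
     PySem.Int.mod m 256]
  let rev := bytesBig.reverse
  1099511627775 - rev.foldl (fun acc b => acc * 256 + b) 0

-- ===== PRECONDITION & SPEC =====
def Spec_construct_kr (kl : Int) (out : Int) : Prop := out = construct_kr_alt kl
instance (kl : Int) (out : Int) : Decidable (Spec_construct_kr kl out) := by unfold Spec_construct_kr; infer_instance

-- ===== CLAIM (what is proved, stated in full; the proofs are below) =====
def Claim_equal_construct_kr : Prop := ∀ (kl : Int), Dom_construct_kr kl → Spec_construct_kr kl (construct_kr kl)

-- ===== LEMMAS AND PROOFS =====
theorem pv_lor_add (a : ℕ) : ∀ b, a &&& b = 0 → a ||| b = a + b := by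
  induction a using Nat.binaryRec with
  | zero => simp
  | bit x m ih =>
    intro b
    induction b using Nat.binaryRec with
    | zero => simp
    | bit y n _ =>
      intro h
      rw [Nat.land_bit] at h
      rw [Nat.bit_eq_zero_iff] at h
      obtain ⟨h1, h2⟩ := h
      rw [Nat.lor_bit, ih n h1]
      cases x <;> cases y <;> simp_all [Nat.bit] <;> omega

theorem pv_band255 (a : Int) : PySem.Int.band a 255 = a % 256 := by
  unfold PySem.Int.band
  split
  · rw [if_pos (by norm_num)]
    have h : a.toNat &&& (255 : Int).toNat = a.toNat % 2 ^ 8 := by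
      have := Nat.and_two_pow_sub_one_eq_mod a.toNat 8
      norm_num at this ⊢
      exact this
    rw [h]
    omega
  · rw [if_pos (by norm_num)]
    have h : (255 : Int).toNat &&& (-a - 1).toNat = (-a - 1).toNat % 2 ^ 8 := by
      rw [Nat.land_comm]
      have := Nat.and_two_pow_sub_one_eq_mod (-a - 1).toNat 8
      norm_num at this ⊢
      exact this
    rw [h]
    omega

theorem pv_bor_disjoint (k : ℕ) (a b : Int) (ha : 0 ≤ a) (hmod : a % 2 ^ k = 0)
    (hb : 0 ≤ b) (hb' : b < 2 ^ k) : PySem.Int.bor a b = a + b := by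
  have hpow : ((2 ^ k : ℕ) : Int) = 2 ^ k := by push_cast; ring
  rw [PySem.Int.bor_of_nonneg ha hb]
  have hand : a.toNat &&& b.toNat = 0 := by
    apply Nat.eq_of_testBit_eq
    intro i
    simp only [Nat.testBit_and, Nat.zero_testBit, Bool.and_eq_false_iff]
    by_cases hi : i < k
    · left
      have hdvd : 2 ^ k ∣ a.toNat := by
        apply Int.natCast_dvd_natCast.mp
        rw [hpow, Int.toNat_of_nonneg ha]
        exact Int.dvd_of_emod_eq_zero hmod
      rcases hdvd with ⟨c, hc⟩
      rw [hc]
      simp [Nat.testBit_mul_two_pow, Nat.mul_comm]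
      omega
    · right
      refine Nat.testBit_lt_two_pow ?_
      have h1 : b.toNat < 2 ^ k := by omega
      exact lt_of_lt_of_le h1 (Nat.pow_le_pow_right (by norm_num) (Nat.le_of_not_lt hi))
  rw [pv_lor_add _ _ hand]
  omega

theorem pv_main (kl : Int) : construct_kr kl = construct_kr_alt kl := by
  have hrange : PySem.List.pyRange 0 5 1 = [0,1,2,3,4] := by decide
  have hs0 : kl >>> (0:Int) = kl := by
    rw [show kl >>> (0:Int) = kl >>> (0:Nat) from by cases kl <;> rfl, Int.shiftRight_eq_div_pow]; norm_num
  have hs8 : kl >>> (8:Int) = kl / 256 := by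
    rw [show kl >>> (8:Int) = kl >>> (8:Nat) from by cases kl <;> rfl, Int.shiftRight_eq_div_pow]; norm_num
  have hs16 : kl >>> (16:Int) = kl / 65536 := by
    rw [show kl >>> (16:Int) = kl >>> (16:Nat) from by cases kl <;> rfl, Int.shiftRight_eq_div_pow]; norm_num
  have hs24 : kl >>> (24:Int) = kl / 16777216 := by
    rw [show kl >>> (24:Int) = kl >>> (24:Nat) from by cases kl <;> rfl, Int.shiftRight_eq_div_pow]; norm_num
  have hs32 : kl >>> (32:Int) = kl / 4294967296 := by
    rw [show kl >>> (32:Int) = kl >>> (32:Nat) from by cases kl <;> rfl, Int.shiftRight_eq_div_pow]; norm_num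
  unfold construct_kr construct_kr_alt
  rw [hrange]
  simp only [List.map, List.reverse, List.reverseAux, List.foldl]
  simp [List.foldl, pv_band255, Int.shiftLeft_eq, PySem.List.pyGetD, PySem.List.pyGet?, PySem.List.pyIdx?,
    show Int.toNat 0 = 0 from rfl, show Int.toNat 8 = 8 from rfl, show Int.toNat 16 = 16 from rfl,
    show Int.toNat 24 = 24 from rfl, show Int.toNat 32 = 32 from rfl,
    show ∀ a, PySem.Int.mod a 256 = a % 256 from fun a => PySem.Int.mod_eq_emod_of_pos (by norm_num),
    show ∀ a, PySem.Int.mod a 1099511627776 = a % 1099511627776 from fun a => PySem.Int.mod_eq_emod_of_pos (by norm_num),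
    show ∀ a, PySem.Int.floordiv a 256 = a / 256 from fun a => PySem.Int.floordiv_eq_ediv_of_pos (by norm_num),
    show ∀ a, PySem.Int.floordiv a 65536 = a / 65536 from fun a => PySem.Int.floordiv_eq_ediv_of_pos (by norm_num),
    show ∀ a, PySem.Int.floordiv a 16777216 = a / 16777216 from fun a => PySem.Int.floordiv_eq_ediv_of_pos (by norm_num),
    show ∀ a, PySem.Int.floordiv a 4294967296 = a / 4294967296 from fun a => PySem.Int.floordiv_eq_ediv_of_pos (by norm_num)]
  rw [hs0, hs8, hs16, hs24, hs32]
  rw [pv_bor_disjoint 32 ((255 - kl % 256) * 4294967296) ((255 - kl / 256 % 256) * 16777216)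
        (by omega) (by omega) (by omega) (by omega),
      pv_bor_disjoint 24 ((255 - kl % 256) * 4294967296 + (255 - kl / 256 % 256) * 16777216)
        ((255 - kl / 65536 % 256) * 65536) (by omega) (by omega) (by omega) (by omega),
      pv_bor_disjoint 16 ((255 - kl % 256) * 4294967296 + (255 - kl / 256 % 256) * 16777216 + (255 - kl / 65536 % 256) * 65536)
        ((255 - kl / 16777216 % 256) * 256) (by omega) (by omega) (by omega) (by omega),
      pv_bor_disjoint 8 ((255 - kl % 256) * 4294967296 + (255 - kl / 256 % 256) * 16777216 + (255 - kl / 65536 % 256) * 65536 + (255 - kl / 16777216 % 256) * 256)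
        (255 - kl / 4294967296 % 256) (by omega) (by omega) (by omega) (by omega)]
  omega

-- ===== VERDICT (by name: the statement is the Claim_ definition above) =====
theorem construct_kr_spec : Claim_equal_construct_kr := by
  unfold Claim_equal_construct_kr Spec_construct_kr
  intro kl _
  exact pv_main kl
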